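-- pv_equiv track=rewrite | github.com/JoseLuis-2006/Practicas-Parcial-2 | validarrepaso.py | ValidarAscii
-- ===== SOURCE A (Python) =====
-- def ValidarAscii(valor):  # Español: Método para validar usando ASCII / English: Method to validate using ASCII
--     con = 0  # Español: Contador para números / English: Counter for numbers
--     con2 = 0  # Español: Contador para letras / English: Counter for letters
--     for i in valor:  # Español: Recorre cada carácter del valor / English: Iterates through each character of value
--         if ord(i) >= 48 and ord(i)<= 57:  # Español: Verifica si es número (0-9) / English: Checks if it's a number (0-9)
--             con += 1  # Español: Incrementa contador números / English: Increases number counter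
--         if (ord(i)>= 65 and ord(i)<=90) or (ord(i)>= 97 and ord(i)<=122):  # Español: Verifica si es letra (A-Z o a-z) / English: Checks if it's a letter (A-Z or a-z)
--             con2 += 1  # Español: Incrementa contador letras / English: Increases letter counter
--
--     if con == len(valor):  # Español: Si todos son números / English: If all are numbers
--         return "Numeros"  # Español: Retorna "Números" / English: Returns "Numbers"
--     elif con2 == len(valor):  # Español: Si todos son letras / English: If all are letters
--         return "Letras"  # Español: Retorna "Letras" / English: Returns "Letters"
--     else:  # Español: Si es mezcla / English: If it's a mix
--         return "Letras y numeros"  # Español: Retorna "Letras y números" / English: Returns "Letters and numbers"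
-- ===== SOURCE B (Python) =====
-- def ValidarAscii(valor):
--     if all(48 <= ord(c) <= 57 for c in valor):
--         return "Numeros"
--     if all((65 <= ord(c) <= 90) or (97 <= ord(c) <= 122) for c in valor):
--         return "Letras"
--     return "Letras y numeros"
-- ===== Notes on version B (the rewrite author's own statement) =====
-- stated objective: simpler
-- what changed: Replaced the two integer counters compared against len(valor) by two short-circuiting all() scans over explicit ord ranges.
import Mathlib
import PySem

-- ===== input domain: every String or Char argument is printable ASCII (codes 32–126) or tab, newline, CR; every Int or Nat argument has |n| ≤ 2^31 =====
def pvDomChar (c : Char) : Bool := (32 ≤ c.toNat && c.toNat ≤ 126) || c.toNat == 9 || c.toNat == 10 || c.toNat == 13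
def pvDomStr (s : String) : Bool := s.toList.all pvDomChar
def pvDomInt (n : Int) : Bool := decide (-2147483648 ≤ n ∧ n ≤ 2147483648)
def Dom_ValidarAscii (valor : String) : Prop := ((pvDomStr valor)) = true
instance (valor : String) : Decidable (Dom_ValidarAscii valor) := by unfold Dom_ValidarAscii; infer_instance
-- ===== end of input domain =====

-- B replaces A's two counters-vs-length comparison by two short-circuiting all-scans (simpler decomposition, same cost).

-- ===== PORT A =====
-- One pass keeping (con, con2); then compare each counter with len(valor).
def pvStepA (st : Int × Int) (i : Char) : Int × Int :=
  let st := if 48 ≤ (i.toNat : Int) ∧ (i.toNat : Int) ≤ 57 then (st.1 + 1, st.2) else st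
  if (65 ≤ (i.toNat : Int) ∧ (i.toNat : Int) ≤ 90) ∨ (97 ≤ (i.toNat : Int) ∧ (i.toNat : Int) ≤ 122)
    then (st.1, st.2 + 1) else st

def ValidarAscii (valor : String) : String :=
  let p : Int × Int := valor.toList.foldl pvStepA (0, 0)
  if p.1 = (valor.toList.length : Int) then "Numeros"
  else if p.2 = (valor.toList.length : Int) then "Letras"
  else "Letras y numeros"

-- ===== PORT B =====
def pvIsDig (c : Char) : Bool := decide (48 ≤ (c.toNat : Int) ∧ (c.toNat : Int) ≤ 57)
def pvIsLet (c : Char) : Bool :=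
  decide ((65 ≤ (c.toNat : Int) ∧ (c.toNat : Int) ≤ 90) ∨ (97 ≤ (c.toNat : Int) ∧ (c.toNat : Int) ≤ 122))

def ValidarAscii_alt (valor : String) : String :=
  if valor.toList.all pvIsDig then "Numeros"
  else if valor.toList.all pvIsLet then "Letras"
  else "Letras y numeros"

-- ===== PRECONDITION & SPEC =====
def Spec_ValidarAscii (valor : String) (out : String) : Prop := out = ValidarAscii_alt valor
instance (valor : String) (out : String) : Decidable (Spec_ValidarAscii valor out) := by unfold Spec_ValidarAscii; infer_instance

-- ===== CLAIM (what is proved, stated in full; the proofs are below) =====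
def Claim_equal_ValidarAscii : Prop := ∀ (valor : String), Dom_ValidarAscii valor → Spec_ValidarAscii valor (ValidarAscii valor)

-- ===== LEMMAS AND PROOFS =====

theorem pvStepA_eq (st : Int × Int) (c : Char) :
    pvStepA st c = (st.1 + (if pvIsDig c then (1 : Int) else 0),
                    st.2 + (if pvIsLet c then (1 : Int) else 0)) := by
  unfold pvStepA pvIsDig pvIsLet
  simp only [decide_eq_true_eq]
  split_ifs <;> simp_all

theorem pvFold_counts (l : List Char) (a b : Int) :
    l.foldl pvStepA (a, b) = (a + (l.countP pvIsDig : Int), b + (l.countP pvIsLet : Int)) := by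
  induction l generalizing a b with
  | nil => simp
  | cons c t ih =>
    rw [List.foldl_cons, pvStepA_eq, ih, List.countP_cons, List.countP_cons]
    by_cases h1 : pvIsDig c <;> by_cases h2 : pvIsLet c <;>
      simp [h1, h2, Prod.mk.injEq] <;> omega

theorem pvCount_eq_iff_all (p : Char → Bool) (l : List Char) :
    ((l.countP p : Int) = (l.length : Int)) ↔ l.all p = true := by
  rw [Int.ofNat_inj, List.all_eq_true]
  exact ⟨fun h x hx => List.countP_eq_length.mp h x hx, fun h => List.countP_eq_length.mpr h⟩

theorem ValidarAscii_eq (valor : String) : ValidarAscii valor = ValidarAscii_alt valor := by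
  unfold ValidarAscii ValidarAscii_alt
  rw [pvFold_counts]
  have e1 := propext (pvCount_eq_iff_all pvIsDig valor.toList)
  have e2 := propext (pvCount_eq_iff_all pvIsLet valor.toList)
  simp only [zero_add, e1, e2]

-- ===== VERDICT (by name: the statement is the Claim_ definition above) =====
theorem ValidarAscii_spec : Claim_equal_ValidarAscii := by
  intro valor _
  unfold Spec_ValidarAscii
  exact ValidarAscii_eq valor
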